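-- pv_equiv track=rewrite | github.com/nevil-ing/collegeward | app/services/file_processor.py | _chunk_by_size
-- ===== SOURCE A (Python) =====
-- from typing import List, Dict, Any, Optional, Tuple
--
-- def _chunk_by_size(text: str, chunk_size: int, overlap: int) -> List[str]:
--             """Chunk text by character size with overlap"""
--             chunks = []
--             start = 0
--
--             while start < len(text):
--                 end = start + chunk_size
--
--                 # If this isn't the last chunk, try to break at word boundary
--                 if end < len(text):
--                     # Look for the last space within the chunk
--                     last_space = text.rfind(' ', start, end)
--                     if last_space > start:
--                         end = last_space
--
--                 chunk = text[start:end].strip()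
--                 if chunk:
--                     chunks.append(chunk)
--
--                 # Move start position with overlap
--                 start = max(start + 1, end - overlap)
--
--             return chunks
-- ===== SOURCE B (Python) =====
-- def _chunk_by_size(text: str, chunk_size: int, overlap: int) -> list:
--     """Chunk text by size with overlap: one O(n) pass precomputes, for every
--     position, the last space strictly before it, so each window's word-boundary
--     lookup is O(1); all chunk boundaries are computed first, then sliced."""
--     n = len(text)
--     # last[i] = index of the last space strictly before position i, else -1
--     last = [-1] * (n + 1)
--     cur = -1
--     for i, c in enumerate(text):
--         if c == ' ':
--             cur = i
--         last[i + 1] = cur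
--     bounds = []
--     start = 0
--     while start < n:
--         end = start + chunk_size
--         if end < n:
--             ls = last[end]
--             if ls > start:
--                 end = ls
--         bounds.append((start, end))
--         start = max(start + 1, end - overlap)
--     return [p for p in (text[s:e].strip() for s, e in bounds) if p]
-- ===== Notes on version B (the rewrite author's own statement) =====
-- stated objective: alternative
-- what changed: Replaces the per-window rfind scan with a last-space-before table precomputed in one pass (O(1) boundary lookup per window) and computes all chunk boundaries first, slicing and filtering afterwards; Pre_ excludes negative chunk_size, a degenerate input no chunker is asked for, where A's word boundary comes from Python's negative-index clamping inside str.rfind and the natural table lookup does not reproduce it.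
-- outside the precondition, e.g. on _chunk_by_size('ab b a ', -1, 5): A returns ['ab b'], B returns ['ab b a']
import Mathlib
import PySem

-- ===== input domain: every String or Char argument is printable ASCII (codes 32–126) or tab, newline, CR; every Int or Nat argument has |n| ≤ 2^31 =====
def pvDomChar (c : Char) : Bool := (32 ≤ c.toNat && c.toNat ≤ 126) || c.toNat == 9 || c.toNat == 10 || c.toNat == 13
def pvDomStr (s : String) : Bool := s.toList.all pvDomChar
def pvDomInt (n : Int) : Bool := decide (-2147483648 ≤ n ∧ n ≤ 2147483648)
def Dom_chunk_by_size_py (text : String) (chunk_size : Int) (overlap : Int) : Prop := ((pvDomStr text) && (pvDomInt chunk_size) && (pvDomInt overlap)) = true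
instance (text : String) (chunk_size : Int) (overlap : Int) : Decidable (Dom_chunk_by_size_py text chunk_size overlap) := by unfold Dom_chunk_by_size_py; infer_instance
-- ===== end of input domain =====

-- B replaces A's per-window rfind scan by a last-space-before table built once, and
-- computes all chunk boundaries before slicing (objective: alternative algorithm).

-- ===== PORT A =====
-- the while loop of A; start advances by ≥ 1 each iteration, so fuel = len(text)+1
-- is never exhausted while start < len(text) (the fuel-0 branch is unreachable).
def chunkALoop (cs : List Char) (chunk_size : Int) (overlap : Int) :
    Nat → Int → List String → List String
  | 0, _, acc => acc
  | fuel + 1, start, acc =>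
    if start < (cs.length : Int) then
      -- end = start + chunk_size
      let e0 := start + chunk_size
      -- if end < len(text): last_space = text.rfind(' ', start, end); if last_space > start: end = last_space
      let e :=
        if e0 < (cs.length : Int) then
          let last_space := PySem.Chars.rfindFrom cs [' '] start (some e0)
          if last_space > start then last_space else e0
        else e0
      -- chunk = text[start:end].strip()
      let chunk := PySem.Chars.strip (PySem.Chars.slice cs (some start) (some e))
      -- if chunk: chunks.append(chunk)
      let acc' := if chunk ≠ [] then acc ++ [String.ofList chunk] else acc
      -- start = max(start + 1, end - overlap)
      chunkALoop cs chunk_size overlap fuel (max (start + 1) (e - overlap)) acc'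
    else acc

def chunk_by_size_py (text : String) (chunk_size : Int) (overlap : Int) : List String :=
  chunkALoop text.toList chunk_size overlap (text.toList.length + 1) 0 []

-- ===== PORT B =====
-- last-space-before table: last[i] = index of last space strictly before i, else -1
-- (the Python preallocates and assigns last[i+1]; the fold builds the same list).
def buildLast (cs : List Char) : List Int :=
  ((PySem.List.enumerate cs).foldl
    (fun (st : List Int × Int) ic =>
      let cur := if ic.2 = ' ' then ic.1 else st.2
      (st.1 ++ [cur], cur))
    ([-1], -1)).1

-- the while loop of B collecting (start, end) boundary pairs; same fuel argument as A's loop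
def chunkBBounds (cs : List Char) (last : List Int) (chunk_size : Int) (overlap : Int) :
    Nat → Int → List (Int × Int)
  | 0, _ => []
  | fuel + 1, start =>
    if start < (cs.length : Int) then
      let e0 := start + chunk_size
      let e :=
        if e0 < (cs.length : Int) then
          -- ls = last[end]  (within Pre_, 0 ≤ end ≤ n < len(last), so in range)
          let ls := (PySem.List.pyGet? last e0).getD (-1)
          if ls > start then ls else e0
        else e0
      (start, e) :: chunkBBounds cs last chunk_size overlap fuel (max (start + 1) (e - overlap))
    else []

def chunk_by_size_py_alt (text : String) (chunk_size : Int) (overlap : Int) : List String :=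
  let cs := text.toList
  let bounds := chunkBBounds cs (buildLast cs) chunk_size overlap (cs.length + 1) 0
  -- [p for p in (text[s:e].strip() for s, e in bounds) if p]
  ((bounds.map (fun se => PySem.Chars.strip (PySem.Chars.slice cs (some se.1) (some se.2)))).filter
      (fun p => decide (p ≠ []))).map String.ofList

-- ===== PRECONDITION & SPEC =====
-- Pre_ excludes negative chunk_size, a degenerate input no chunker is asked for, where A's
-- word boundary comes from Python's negative-index clamping inside str.rfind and B's natural
-- table lookup does not reproduce it (both behaviours there are accidents, neither specified).
def Pre_chunk_by_size_py (text : String) (chunk_size : Int) (overlap : Int) : Prop :=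
  0 ≤ chunk_size
instance (text : String) (chunk_size : Int) (overlap : Int) : Decidable (Pre_chunk_by_size_py text chunk_size overlap) := by unfold Pre_chunk_by_size_py; infer_instance
def pvWitness_chunk_by_size_py : String × Int × Int := ("ab cd ef gh", 5, 2)

def Spec_chunk_by_size_py (text : String) (chunk_size : Int) (overlap : Int) (out : List String) : Prop := out = chunk_by_size_py_alt text chunk_size overlap
instance (text : String) (chunk_size : Int) (overlap : Int) (out : List String) : Decidable (Spec_chunk_by_size_py text chunk_size overlap out) := by unfold Spec_chunk_by_size_py; infer_instance

-- ===== CLAIM (what is proved, stated in full; the proofs are below) =====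
def Claim_equal_chunk_by_size_py : Prop := ∀ (text : String) (chunk_size : Int) (overlap : Int), Dom_chunk_by_size_py text chunk_size overlap → Pre_chunk_by_size_py text chunk_size overlap → Spec_chunk_by_size_py text chunk_size overlap (chunk_by_size_py text chunk_size overlap)

-- ===== LEMMAS AND PROOFS =====

-- lsp cs k = index of the last space strictly before position k, else -1
def lsp (cs : List Char) : Nat → Int
  | 0 => -1
  | k + 1 => if cs[k]? = some ' ' then (k : Int) else lsp cs k

theorem lsp_lt (cs : List Char) (k : Nat) : lsp cs k < (k : Int) := by
  induction k with
  | zero => simp [lsp]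
  | succ k ih =>
    simp only [lsp]
    split
    · push_cast; omega
    · push_cast at ih ⊢; omega

theorem lsp_sound (cs : List Char) (k : Nat) :
    lsp cs k = -1 ∨ ∃ j : Nat, lsp cs k = (j : Int) ∧ j < k ∧ cs[j]? = some ' ' := by
  induction k with
  | zero => left; rfl
  | succ k ih =>
    simp only [lsp]
    split
    · right; exact ⟨k, rfl, Nat.lt_succ_self k, by assumption⟩
    · rcases ih with h | ⟨j, h1, h2, h3⟩
      · left; exact h
      · right; exact ⟨j, h1, Nat.lt_succ_of_lt h2, h3⟩

theorem lsp_complete (cs : List Char) (k : Nat) (j : Nat) (hj : j < k)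
    (hs : cs[j]? = some ' ') : (j : Int) ≤ lsp cs k := by
  induction k with
  | zero => omega
  | succ k ih =>
    simp only [lsp]
    rcases Nat.lt_or_ge j k with h | h
    · split
      · have := ih h; omega
      · exact ih h
    · have hjk : j = k := by omega
      subst hjk
      simp [hs]

theorem win_get (cs : List Char) (a b j : Nat) (h : a + j < b) :
    (List.drop a (List.take b cs))[j]? = cs[a + j]? := by
  rw [List.getElem?_drop, List.getElem?_take]
  simp [h]

theorem win_len (cs : List Char) (a b : Nat) (_hb : b ≤ cs.length) :
    (List.drop a (List.take b cs)).length = b - a := by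
  simp [List.length_drop, List.length_take]
  omega

-- (i): if the window rfind hits at offset ≥ 1, the global last space before b is a + r
theorem window_hit (cs : List Char) (a b : Nat) (hab : a ≤ b) (_hb : b ≤ cs.length)
    (hr : 1 ≤ lsp (List.drop a (List.take b cs)) (b - a)) :
    lsp cs b = (a : Int) + lsp (List.drop a (List.take b cs)) (b - a) := by
  set w := List.drop a (List.take b cs) with hw
  rcases lsp_sound w (b - a) with h | ⟨j1, h1, h2, h3⟩
  · omega
  · -- cs[a + j1] = ' '
    have hcs : cs[a + j1]? = some ' ' := by
      rw [← win_get cs a b j1 (by omega)]; exact h3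
    have hle : ((a + j1 : Nat) : Int) ≤ lsp cs b := lsp_complete cs b (a + j1) (by omega) hcs
    rcases lsp_sound cs b with h | ⟨j0, g1, g2, g3⟩
    · rw [h] at hle; push_cast at hle; omega
    · -- j0 ≥ a + j1 ≥ a + 1, so j0 - a is in the window
      have hj0a : a + 1 ≤ j0 := by rw [g1] at hle; push_cast at hle h1; omega
      have hwj' : w[j0 - a]? = some ' ' := by
        have := win_get cs a b (j0 - a) (by omega)
        rw [show a + (j0 - a) = j0 by omega] at this
        rw [this]; exact g3
      have h2' : ((j0 - a : Nat) : Int) ≤ lsp w (b - a) := lsp_complete w (b - a) (j0 - a) (by omega) hwj'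
      have hja : ((j0 - a : Nat) : Int) = (j0 : Int) - a := by omega
      rw [g1, h1]
      have e1 : (j0 : Int) - a ≤ (j1 : Int) := by rw [← hja, ← h1]; exact h2'
      have e2 : (a : Int) + j1 ≤ j0 := by rw [g1] at hle; exact_mod_cast hle
      omega

theorem prefix_space (xs : List Char) :
    ([' '].isPrefixOf xs) = decide (xs[0]? = some ' ') := by
  cases xs with
  | nil => simp [List.isPrefixOf]
  | cons a t =>
    by_cases h : a = ' '
    · simp [List.isPrefixOf, h]
    · simp only [List.isPrefixOf, List.getElem?_cons_zero]
      simp [h]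
      exact fun e => h e.symm

theorem rfind_go_eq_lsp (xs : List Char) (k : Nat) :
    PySem.Chars.rfind.go xs [' '] k = lsp xs (k + 1) := by
  induction k with
  | zero =>
    simp only [PySem.Chars.rfind.go, lsp]
    rw [prefix_space]
    by_cases h : xs[0]? = some ' ' <;> simp [h]
  | succ k ih =>
    simp only [PySem.Chars.rfind.go, lsp]
    rw [prefix_space]
    have : (List.drop (k+1) xs)[0]? = xs[k+1]? := by
      rw [List.getElem?_drop]
    rw [this]
    by_cases h : xs[k+1]? = some ' ' <;> simp [h, ih, lsp]

theorem rfind_eq_lsp (xs : List Char) :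
    PySem.Chars.rfind xs [' '] = lsp xs xs.length := by
  rw [PySem.Chars.rfind, rfind_go_eq_lsp]
  simp only [lsp]
  simp

theorem rfind_w (cs : List Char) (a b : Nat) (hb : b ≤ cs.length) :
    PySem.Chars.rfind (List.drop a (List.take b cs)) [' ']
      = lsp (List.drop a (List.take b cs)) (b - a) := by
  rw [rfind_eq_lsp, win_len cs a b hb]

theorem end_eq_core (cs : List Char) (start hi X : Int) (h0 : 0 ≤ start)
    (hhi0 : 0 ≤ hi) (hhin : hi ≤ (cs.length : Int)) :
    (if (if hi < start then (-1 : Int)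
         else if PySem.Chars.rfind (List.drop start.toNat (List.take hi.toNat cs)) [' '] = -1 then -1
         else start + PySem.Chars.rfind (List.drop start.toNat (List.take hi.toNat cs)) [' ']) > start
     then (if hi < start then (-1 : Int)
         else if PySem.Chars.rfind (List.drop start.toNat (List.take hi.toNat cs)) [' '] = -1 then -1
         else start + PySem.Chars.rfind (List.drop start.toNat (List.take hi.toNat cs)) [' '])
     else X)
    = (if lsp cs hi.toNat > start then lsp cs hi.toNat else X) := by
  have hbl : hi.toNat ≤ cs.length := by omega
  rw [rfind_w cs start.toNat hi.toNat hbl]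
  set a := start.toNat with ha
  set b := hi.toNat with hb
  set w := List.drop a (List.take b cs) with hw
  set r := lsp w (b - a) with hr
  by_cases hlt : hi < start
  · rw [if_pos hlt]
    have h1 : lsp cs b < start := lt_of_lt_of_le (lsp_lt cs b) (by omega)
    rw [if_neg (by omega), if_neg (by omega)]
  · have hab : a ≤ b := by omega
    rw [if_neg hlt]
    by_cases hgt : lsp cs b > start
    · -- the global last space before b lies inside the window, so both sides return it
      rcases lsp_sound cs b with h | ⟨j0, g1, g2, g3⟩
      · omega
      · have hj0a : a < j0 := by rw [g1] at hgt; omega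
        have hwj : w[j0 - a]? = some ' ' := by
          rw [hw]
          have := win_get cs a b (j0 - a) (by omega)
          rw [show a + (j0 - a) = j0 by omega] at this
          rw [this]; exact g3
        have h2' : ((j0 - a : Nat) : Int) ≤ r := lsp_complete w (b - a) (j0 - a) (by omega) hwj
        have hr1 : 1 ≤ r := by omega
        have hhit : lsp cs b = (a : Int) + r := window_hit cs a b hab hbl hr1
        have hrf : start + r = lsp cs b := by rw [hhit]; omega
        have hrne : ¬ (r = -1) := by omega
        rw [if_neg hrne, hrf]
    · -- no space after start in the window: both sides fall through to X
      rcases lsp_sound w (b - a) with h | ⟨j1, h1, h2, h3⟩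
      · have h' : r = -1 := by rw [hr, h]
        rw [if_pos h', if_neg (show ¬((-1:Int) > start) by omega), if_neg hgt]
      · have hj1 : j1 = 0 := by
          by_contra hne
          have hr1 : 1 ≤ r := by rw [hr, h1]; omega
          have hth := window_hit cs a b hab hbl hr1
          rw [h1] at hth
          omega
        subst hj1
        have hrne : ¬ (r = -1) := by rw [hr, h1]; simp
        have hr0 : start + r = start := by rw [hr, h1]; simp
        rw [if_neg hrne, hr0, if_neg (show ¬(start > start) by omega), if_neg hgt]

def lspT (t : List Char) (i cur : Int) : Nat → Int
  | 0 => cur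
  | k + 1 => if t[k]? = some ' ' then i + (k : Int) else lspT t i cur k

theorem lspT_shift (c : Char) (t : List Char) (i cur : Int) (k : Nat) :
    lspT (c :: t) i cur (k + 1) = lspT t (i + 1) (if c = ' ' then i else cur) k := by
  induction k with
  | zero => simp [lspT]
  | succ k ih =>
    simp only [lspT, List.getElem?_cons_succ]
    by_cases h : t[k]? = some ' '
    · simp only [h, if_pos]
      push_cast
      ring
    · simp only [h, if_false]
      rw [← ih]
      simp [lspT]

theorem fold_enum (t : List Char) : ∀ (i : Int) (l : List Int) (cur : Int),
    (PySem.List.enumerate t i).foldl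
      (fun (st : List Int × Int) ic =>
        let cur := if ic.2 = ' ' then ic.1 else st.2
        (st.1 ++ [cur], cur)) (l, cur)
    = (l ++ (List.range t.length).map (fun j => lspT t i cur (j + 1)),
       lspT t i cur t.length) := by
  induction t with
  | nil => intro i l cur; simp [PySem.List.enumerate, lspT]
  | cons c t ih =>
    intro i l cur
    rw [show PySem.List.enumerate (c :: t) i = (i, c) :: PySem.List.enumerate t (i + 1) from rfl]
    simp only [List.foldl_cons]
    rw [ih]
    have hlist : List.map (fun j => lspT (c :: t) i cur (j + 1)) (List.range (c :: t).length)
        = (if c = ' ' then i else cur) ::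
          List.map (fun j => lspT t (i + 1) (if c = ' ' then i else cur) (j + 1))
            (List.range t.length) := by
      rw [List.length_cons, List.range_succ_eq_map, List.map_cons, List.map_map]
      congr 1
      · simp [lspT]
      · apply List.map_congr_left
        intro j _
        simp only [Function.comp]
        exact lspT_shift c t i cur (j + 1)
    rw [hlist, List.length_cons, lspT_shift, List.append_assoc]
    simp only [List.singleton_append]

theorem lspT_eq_lsp (cs : List Char) (k : Nat) : lspT cs 0 (-1) k = lsp cs k := by
  induction k with
  | zero => rfl
  | succ k ih => simp only [lspT, lsp, ih]; norm_num

theorem buildLast_eq (cs : List Char) :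
    buildLast cs = -1 :: (List.range cs.length).map (fun j => lsp cs (j + 1)) := by
  rw [buildLast, fold_enum]
  simp only [List.singleton_append]
  congr 1
  apply List.map_congr_left
  intro j _
  rw [lspT_eq_lsp]

theorem buildLast_get (cs : List Char) (hi : Int) (h0 : 0 ≤ hi) (hn : hi ≤ (cs.length : Int)) :
    (PySem.List.pyGet? (buildLast cs) hi).getD (-1) = lsp cs hi.toNat := by
  rw [buildLast_eq]
  have h1 : hi = ((hi.toNat : Nat) : Int) := by omega
  rw [h1, PySem.List.pyGet?_natCast]
  cases h : hi.toNat with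
  | zero => simp [lsp]
  | succ m =>
    have hm : m < cs.length := by omega
    simp [hm]

-- per-iteration boundary computations of A and B agree (0 ≤ end, guaranteed by Pre_)
theorem end_eq (cs : List Char) (start e0 : Int) (h0 : 0 ≤ start) (he0 : 0 ≤ e0)
    (hen : e0 < (cs.length : Int)) :
    (if PySem.Chars.rfindFrom cs [' '] start (some e0) > start
     then PySem.Chars.rfindFrom cs [' '] start (some e0) else e0) =
    (if (PySem.List.pyGet? (buildLast cs) e0).getD (-1) > start
     then (PySem.List.pyGet? (buildLast cs) e0).getD (-1)
     else e0) := by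
  rw [buildLast_get cs e0 he0 (by omega)]
  have hA : PySem.Chars.rfindFrom cs [' '] start (some e0)
      = (if e0 < start then (-1 : Int)
         else if PySem.Chars.rfind (List.drop start.toNat (List.take e0.toNat cs)) [' '] = -1 then -1
         else start + PySem.Chars.rfind (List.drop start.toNat (List.take e0.toNat cs)) [' ']) := by
    rw [PySem.Chars.rfindFrom]
    have he : (if (cs.length : Int) < e0 then (cs.length : Int)
        else if e0 < 0 then (if e0 + (cs.length : Int) < 0 then 0 else e0 + (cs.length : Int)) else e0) = e0 := by
      split_ifs <;> omega
    have hst : (if start < 0 then (if start + (cs.length : Int) < 0 then 0 else start + (cs.length : Int)) else start) = start := by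
      split_ifs <;> omega
    simp only [he, hst]
  rw [hA]
  exact end_eq_core cs start e0 e0 h0 he0 (by omega)

theorem loop_eq (cs : List Char) (chunk_size overlap : Int) (hcs : 0 ≤ chunk_size) (fuel : Nat) :
    ∀ (start : Int) (acc : List String), 0 ≤ start →
    chunkALoop cs chunk_size overlap fuel start acc =
      acc ++ (((chunkBBounds cs (buildLast cs) chunk_size overlap fuel start).map
        (fun se => PySem.Chars.strip (PySem.Chars.slice cs (some se.1) (some se.2)))).filter
          (fun p => decide (p ≠ []))).map String.ofList := by
  induction fuel with
  | zero => intro start acc _; simp [chunkALoop, chunkBBounds]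
  | succ fuel ih =>
    intro start acc h0
    rw [chunkALoop, chunkBBounds]
    by_cases hlt : start < (cs.length : Int)
    · rw [if_pos hlt, if_pos hlt]
      dsimp only
      have hend : (if start + chunk_size < (cs.length : Int) then
            (let last_space := PySem.Chars.rfindFrom cs [' '] start (some (start + chunk_size))
             if last_space > start then last_space else start + chunk_size)
          else start + chunk_size)
        = (if start + chunk_size < (cs.length : Int) then
            (let ls := (PySem.List.pyGet? (buildLast cs) (start + chunk_size)).getD (-1)
             if ls > start then ls else start + chunk_size)
          else start + chunk_size) := by
        by_cases he : start + chunk_size < (cs.length : Int)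
        · rw [if_pos he, if_pos he]
          exact end_eq cs start (start + chunk_size) h0 (by omega) he
        · rw [if_neg he, if_neg he]
      rw [hend]
      set e := (if start + chunk_size < (cs.length : Int) then
            (let ls := (PySem.List.pyGet? (buildLast cs) (start + chunk_size)).getD (-1)
             if ls > start then ls else start + chunk_size)
          else start + chunk_size) with hee
      rw [List.map_cons, List.filter_cons]
      set chunk := PySem.Chars.strip (PySem.Chars.slice cs (some start) (some e)) with hch
      rw [ih (max (start + 1) (e - overlap)) _ (by omega)]
      by_cases hc : chunk ≠ []
      · rw [if_pos hc, if_pos (by simpa using hc), List.map_cons]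
        simp [List.append_assoc]
      · rw [if_neg hc, if_neg (by simpa using hc)]
    · rw [if_neg hlt, if_neg hlt]
      simp

-- ===== VERDICT (by name: the statement is the Claim_ definition above) =====
theorem chunk_by_size_py_spec : Claim_equal_chunk_by_size_py := by
  intro text chunk_size overlap _ hpre
  unfold Spec_chunk_by_size_py chunk_by_size_py chunk_by_size_py_alt
  rw [loop_eq text.toList chunk_size overlap hpre _ 0 [] (by omega)]
  simp
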